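-- pv_equiv track=rewrite | github.com/tlittle2/Python | autosys_jil_creation.py | dependencies
-- ===== SOURCE A (Python) =====
-- prefix = "ora_d_c"
--
-- job1 = 'job1'
--
-- job2 = 'job2'
--
-- job3 = 'job3'
--
-- job4 = 'job4'
--
-- def prefixAndJob(ip):
--     return "{}_{}".format(prefix, ip)
--
-- def createDependencies(collection):
--     d = {"{}".format(i): [] for i in collection}
--
--     #job name : upstream dependencies
--     d[job3] = [job1, job2]
--     d[job4] = [job3]
--
--     return d
--
-- def dependencies(collection, ip):
--     adjacencyDict = createDependencies(collection)
--
--     string = ""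
--
--     for k,v in adjacencyDict.items():
--         if ip == k:
--             if len(v) > 0:
--                 for i in range(len(v)):
--                     string += " & s({},0)".format(prefixAndJob(v[i]))
--
--                 return "condition: {}".format(string)
--             else:
--                 return ""
-- ===== SOURCE B (Python) =====
-- prefix = "ora_d_c"
--
-- job1 = 'job1'
-- job2 = 'job2'
-- job3 = 'job3'
-- job4 = 'job4'
--
--
-- def _clause(j):
--     return " & s({}_{},0)".format(prefix, j)
--
--
-- def _seen(collection, ip):
--     # membership test over the str()-coerced elements; no dict is built
--     for i in collection:
--         if "{}".format(i) == ip: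
--             return True
--     return False
--
--
-- def dependencies(collection, ip):
--     # direct if-chain: the two jobs with upstream dependencies are decided outright,
--     # everything else reduces to a recursive membership test over the collection
--     if ip == job3:
--         return "condition: " + _clause(job1) + _clause(job2)
--     if ip == job4:
--         return "condition: " + _clause(job3)
--     if _seen(collection, ip):
--         return ""
-- ===== Notes on version B (the rewrite author's own statement) =====
-- stated objective: simpler
-- what changed: B builds no adjacency dict at all: a direct if-chain decides the two hardcoded dependent jobs (their condition strings assembled by clause concatenation instead of a range-indexed accumulator loop over dict items) and the remaining case is a plain membership scan of the str()-coerced collection.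
import Mathlib
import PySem

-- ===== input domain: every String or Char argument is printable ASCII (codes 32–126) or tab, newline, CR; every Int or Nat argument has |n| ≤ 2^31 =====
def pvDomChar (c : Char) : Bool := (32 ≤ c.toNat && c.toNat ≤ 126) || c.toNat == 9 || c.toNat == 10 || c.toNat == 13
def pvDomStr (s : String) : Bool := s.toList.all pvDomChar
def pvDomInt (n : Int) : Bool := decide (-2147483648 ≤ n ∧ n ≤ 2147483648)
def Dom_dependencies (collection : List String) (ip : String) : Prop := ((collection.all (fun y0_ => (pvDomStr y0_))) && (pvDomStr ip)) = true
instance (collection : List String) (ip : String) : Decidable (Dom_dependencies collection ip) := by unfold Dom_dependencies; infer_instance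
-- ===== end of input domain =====

-- B drops A's per-call adjacency dict and items() scan entirely: an if-chain decides the two
-- hardcoded dependent jobs directly and a membership scan of the collection handles the rest (objective: simpler).


-- ===== PORT A =====
def prefixAndJob (ip : String) : String := "ora_d_c" ++ "_" ++ ip

def createDependencies (collection : List String) : PySem.Dict String (List String) :=
  ((collection.foldl (fun d i => d.insert i ([] : List String)) PySem.Dict.empty).insert
      "job3" ["job1", "job2"]).insert "job4" ["job3"]

-- the 'for k,v in adjacencyDict.items()' loop of A
def depLoop (items : List (String × List String)) (ip : String) : Option String :=
  match items with
  | [] => none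
  | (k, v) :: rest =>
    if ip == k then
      if v.length > 0 then
        some ("condition: " ++
          (PySem.List.pyRange 0 (v.length : Int) 1).foldl
            (fun s i => s ++ (" & s(" ++ prefixAndJob (PySem.List.pyGetD v i "") ++ ",0)")) "")
      else some ""
    else depLoop rest ip

def dependencies (collection : List String) (ip : String) : Option String :=
  depLoop (createDependencies collection).items ip

-- ===== PORT B =====
def clauseB (j : String) : String := " & s(" ++ "ora_d_c" ++ "_" ++ j ++ ",0)"

-- B's _seen loop as structural recursion
def seenB (collection : List String) (ip : String) : Bool :=
  match collection with
  | [] => false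
  | x :: xs => x == ip || seenB xs ip

def dependencies_alt (collection : List String) (ip : String) : Option String :=
  if ip == "job3" then some ("condition: " ++ clauseB "job1" ++ clauseB "job2")
  else if ip == "job4" then some ("condition: " ++ clauseB "job3")
  else if seenB collection ip then some "" else none

-- ===== PRECONDITION & SPEC =====
def Spec_dependencies (collection : List String) (ip : String) (out : Option String) : Prop := out = dependencies_alt collection ip
instance (collection : List String) (ip : String) (out : Option String) : Decidable (Spec_dependencies collection ip out) := by unfold Spec_dependencies; infer_instance

-- ===== CLAIM (what is proved, stated in full; the proofs are below) =====
def Claim_equal_dependencies : Prop := ∀ (collection : List String) (ip : String), Dom_dependencies collection ip → Spec_dependencies collection ip (dependencies collection ip)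

-- ===== LEMMAS AND PROOFS =====

-- A's items() scan returns, for the first key equal to ip, what its body computes; that key's
-- value is exactly (Dict.mk items).get? ip (both take the FIRST match).
theorem depLoop_eq_get? (items : List (String × List String)) (ip : String) :
    depLoop items ip =
      match (PySem.Dict.mk items).get? ip with
      | some v =>
          if v.length > 0 then
            some ("condition: " ++
              (PySem.List.pyRange 0 (v.length : Int) 1).foldl
                (fun s i => s ++ (" & s(" ++ prefixAndJob (PySem.List.pyGetD v i "") ++ ",0)")) "")
          else some ""
      | none => none := by
  induction items with
  | nil => simp [depLoop, PySem.Dict.get?]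
  | cons p rest ih =>
    obtain ⟨k, v⟩ := p
    rw [depLoop, PySem.Dict.get?_mk_cons]
    by_cases h : ip = k
    · subst h; simp
    · have h1 : (ip == k) = false := by simp [h]
      have h2 : (k == ip) = false := by simp [Ne.symm h]
      simp [h1, h2, ih]

-- lookup in the collection-built dict of empty lists
theorem get?_foldl_empty (l : List String) (d : PySem.Dict String (List String)) (ip : String) :
    (l.foldl (fun d i => d.insert i ([] : List String)) d).get? ip =
      if ip ∈ l then some [] else d.get? ip := by
  induction l generalizing d with
  | nil => simp
  | cons x xs ih =>
    simp only [List.foldl_cons, ih]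
    by_cases hx : ip ∈ xs
    · simp [hx]
    · by_cases hix : ip = x
      · subst hix; simp [hx, PySem.Dict.get?_insert_self]
      · simp [hx, hix]; exact PySem.Dict.get?_insert_of_ne _ _ hix

theorem seenB_eq_mem (l : List String) (ip : String) :
    seenB l ip = decide (ip ∈ l) := by
  induction l with
  | nil => simp [seenB]
  | cons x xs ih =>
    by_cases h : x = ip
    · simp [seenB, ih, h]
    · simp [seenB, ih, h, Ne.symm h]

theorem dependencies_eq_alt (collection : List String) (ip : String) :
    dependencies collection ip = dependencies_alt collection ip := by
  unfold dependencies
  rw [depLoop_eq_get?]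
  have hmk : (PySem.Dict.mk (createDependencies collection).items) = createDependencies collection := rfl
  rw [hmk]
  unfold createDependencies dependencies_alt
  by_cases h4 : ip = "job4"
  · subst h4
    rw [PySem.Dict.get?_insert_self, if_neg (by decide), if_pos (by decide)]
    decide
  · rw [PySem.Dict.get?_insert_of_ne _ _ h4]
    by_cases h3 : ip = "job3"
    · subst h3
      rw [PySem.Dict.get?_insert_self, if_pos (by decide)]
      decide
    · rw [PySem.Dict.get?_insert_of_ne _ _ h3, get?_foldl_empty]
      have hb3 : (ip == "job3") = false := by simp [h3]
      have hb4 : (ip == "job4") = false := by simp [h4]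
      rw [seenB_eq_mem]
      by_cases hm : ip ∈ collection
      · simp [hm, hb3, hb4]
      · simp [hm, hb3, hb4, PySem.Dict.get?_empty]

-- ===== VERDICT (by name: the statement is the Claim_ definition above) =====
theorem dependencies_spec : Claim_equal_dependencies := by
  intro collection ip _
  unfold Spec_dependencies
  exact dependencies_eq_alt collection ip
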